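-- pv_equiv track=rewrite | github.com/shubharthaksangharsha/section-test | test.py | multiply_even_numbers_in_interval_fixed
-- ===== SOURCE A (Python) =====
-- def multiply_even_numbers_in_interval_fixed (start, stop):
--
--     """ A program to multiply even numbers between two input
--     values, start and stop (INCLUSIVE). For example,
--
--         multiply_even_numbers_in_interval (5, 20)
--
--     should multiply:
--
--         6 x 8 x 10 x 12 x 14 x 16 x 18 x 20
--
--     """
--
--     # Set initial value of product
--     product = 1
--
--     # Create a string representation of the multiplication.
--     string_representation = "1"
--
--     # Initialise a counter
--     i = start
--     while i <= stop:
--         if i % 2 == 0: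
--             product *= i
--             string_representation += (f" x {i}")
--         i += 1
--     print (string_representation)
--     return product
-- ===== SOURCE B (Python) =====
-- def _prod(xs):
--     # balanced (divide-and-conquer) product of a list of ints
--     if not xs:
--         return 1
--     if len(xs) == 1:
--         return xs[0]
--     m = len(xs) // 2
--     return _prod(xs[:m]) * _prod(xs[m:])
--
--
-- def multiply_even_numbers_in_interval_fixed(start, stop):
--     evens = list(range(start + (start % 2), stop + 1, 2))
--     print("1" + "".join(f" x {e}" for e in evens))
--     return _prod(evens)
-- ===== Notes on version B (the rewrite author's own statement) =====
-- stated objective: alternative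
-- what changed: Replaces the per-integer while-loop with a parity branch by direct generation of the even stepped range plus a recursive balanced (divide-and-conquer) product over it; the printed factor string is built by a join over the same range.
import Mathlib
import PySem

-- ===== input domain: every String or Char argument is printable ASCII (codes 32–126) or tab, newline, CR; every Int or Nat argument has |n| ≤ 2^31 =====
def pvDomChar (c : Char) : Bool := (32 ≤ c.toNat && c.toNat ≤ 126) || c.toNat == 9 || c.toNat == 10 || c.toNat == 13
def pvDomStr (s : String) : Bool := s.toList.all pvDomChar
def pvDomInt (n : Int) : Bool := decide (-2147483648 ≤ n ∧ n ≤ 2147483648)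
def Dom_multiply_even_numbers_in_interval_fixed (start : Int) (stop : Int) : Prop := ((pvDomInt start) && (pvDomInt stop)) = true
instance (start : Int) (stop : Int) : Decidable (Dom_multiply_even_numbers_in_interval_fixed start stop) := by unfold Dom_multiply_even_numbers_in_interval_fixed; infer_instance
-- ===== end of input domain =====

-- B replaces A's per-integer while-loop (with its parity branch) by direct generation of the
-- even stepped range plus a recursive balanced product over it ("alternative" objective).
-- Both Pythons print a factor string to stdout (identical in A and B); the equivalence proved
-- here is about the RETURN value, and the ports carry the string only as dead loop state (A)
-- or omit it (B).

-- ===== PORT A =====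
-- while i <= stop: if i % 2 == 0: product *= i; string += " x {i}"; i += 1 — state (product, string)
def pvLoopA (stop i product : Int) (s : String) : Int × String :=
  if i ≤ stop then
    if PySem.Int.mod i 2 = 0 then
      pvLoopA stop (i + 1) (product * i) (s ++ " x " ++ PySem.Int.toStr i)
    else
      pvLoopA stop (i + 1) product s
  else (product, s)
termination_by (stop + 1 - i).toNat
decreasing_by all_goals { simp; omega }

def multiply_even_numbers_in_interval_fixed (start : Int) (stop : Int) : Int :=
  (pvLoopA stop start 1 "1").1

-- ===== PORT B =====
-- _prod: balanced divide-and-conquer product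
def pvProdBal : List Int → Int
  | [] => 1
  | [x] => x
  | a :: b :: t =>
    let m := (a :: b :: t).length / 2
    pvProdBal ((a :: b :: t).take m) * pvProdBal ((a :: b :: t).drop m)
termination_by xs => xs.length
decreasing_by all_goals { simp; omega }

def multiply_even_numbers_in_interval_fixed_alt (start : Int) (stop : Int) : Int :=
  let evens := PySem.List.pyRange (start + PySem.Int.mod start 2) (stop + 1) 2
  pvProdBal evens

-- ===== PRECONDITION & SPEC =====
def Spec_multiply_even_numbers_in_interval_fixed (start : Int) (stop : Int) (out : Int) : Prop := out = multiply_even_numbers_in_interval_fixed_alt start stop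
instance (start : Int) (stop : Int) (out : Int) : Decidable (Spec_multiply_even_numbers_in_interval_fixed start stop out) := by unfold Spec_multiply_even_numbers_in_interval_fixed; infer_instance

-- ===== CLAIM (what is proved, stated in full; the proofs are below) =====
def Claim_equal_multiply_even_numbers_in_interval_fixed : Prop := ∀ (start : Int) (stop : Int), Dom_multiply_even_numbers_in_interval_fixed start stop → Spec_multiply_even_numbers_in_interval_fixed start stop (multiply_even_numbers_in_interval_fixed start stop)

-- ===== LEMMAS AND PROOFS =====

-- pyRange with step 2: empty / cons unfoldings
theorem pyRange_two_nil (a b : Int) (h : b ≤ a) : PySem.List.pyRange a b 2 = [] := by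
  rw [PySem.List.pyRange_of_pos a b (by norm_num)]
  simp [show ¬ a < b by omega]

theorem pyRange_two_cons (a b : Int) (h : a < b) :
    PySem.List.pyRange a b 2 = a :: PySem.List.pyRange (a + 2) b 2 := by
  rw [PySem.List.pyRange_of_pos a b (by norm_num),
      PySem.List.pyRange_of_pos (a + 2) b (by norm_num)]
  have hn : ((b - a + 2 - 1) / 2).toNat
      = (if a + 2 < b then ((b - (a + 2) + 2 - 1) / 2).toNat else 0) + 1 := by
    split_ifs with h2
    · have : (b - a + 1) / 2 = (b - a - 1) / 2 + 1 := by omega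
      omega
    · have hba : b - a = 1 ∨ b - a = 2 := by omega
      rcases hba with h1 | h1 <;> simp [h1]
  rw [if_pos h, hn, List.range_succ_eq_map]
  split_ifs with h2
  · simp [List.map_map, Function.comp]
    ring_nf
    exact fun _ _ => trivial
  · simp

-- Python's mod by 2 is Lean's emod by 2
theorem mod_two_eq (i : Int) : PySem.Int.mod i 2 = i % 2 := by
  unfold PySem.Int.mod
  rw [Int.fmod_eq_emod]
  norm_num

theorem fmod_two_cases (i : Int) : PySem.Int.mod i 2 = 0 ∨ PySem.Int.mod i 2 = 1 := by
  rw [mod_two_eq]; omega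

theorem fmod_succ_of_even (i : Int) (h : PySem.Int.mod i 2 = 0) :
    PySem.Int.mod (i + 1) 2 = 1 := by
  rw [mod_two_eq] at *; omega

theorem fmod_succ_of_odd (i : Int) (h : PySem.Int.mod i 2 = 1) :
    PySem.Int.mod (i + 1) 2 = 0 := by
  rw [mod_two_eq] at *; omega

-- A's loop computes p times the product of the evens in [i, stop]
theorem pvLoopA_eq (stop i p : Int) (s : String) :
    (pvLoopA stop i p s).1
      = p * (PySem.List.pyRange (i + PySem.Int.mod i 2) (stop + 1) 2).prod := by
  rw [pvLoopA]
  split_ifs with hle hev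
  · -- i ≤ stop, i even: head of the range is i
    rw [pvLoopA_eq stop (i + 1) (p * i) _]
    rw [fmod_succ_of_even i hev, hev]
    rw [show i + 0 = i by ring, show i + 1 + 1 = i + 2 by ring]
    rw [pyRange_two_cons i (stop + 1) (by omega)]
    simp; ring
  · -- i ≤ stop, i odd: range starts at i + 1
    rcases fmod_two_cases i with h0 | h1
    · exact absurd h0 hev
    · rw [pvLoopA_eq stop (i + 1) p s, fmod_succ_of_odd i h1, h1]
      rw [show i + 1 + 0 = i + 1 by ring]
  · -- i > stop: empty range
    rw [pyRange_two_nil _ _ (by have := fmod_two_cases i; omega)]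
    simp
termination_by (stop + 1 - i).toNat
decreasing_by all_goals omega

-- the balanced product is the list product
theorem pvProdBal_eq : (xs : List Int) → pvProdBal xs = xs.prod
  | [] => by simp [pvProdBal]
  | [x] => by simp [pvProdBal]
  | a :: b :: t => by
    rw [pvProdBal, pvProdBal_eq, pvProdBal_eq, List.prod_take_mul_prod_drop]
termination_by xs => xs.length
decreasing_by all_goals { simp; omega }

-- ===== VERDICT (by name: the statement is the Claim_ definition above) =====
theorem multiply_even_numbers_in_interval_fixed_spec : Claim_equal_multiply_even_numbers_in_interval_fixed := by
  intro start stop _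
  unfold Spec_multiply_even_numbers_in_interval_fixed
  unfold multiply_even_numbers_in_interval_fixed multiply_even_numbers_in_interval_fixed_alt
  rw [pvLoopA_eq, pvProdBal_eq]
  simp
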